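-- pv_equiv track=rewrite | github.com/h3lim/CodingProblems | Programmers/모의고사.py | solution
-- ===== SOURCE A (Python) =====
-- def solution(answers):
--     ans = []
--     student1 = [1, 2, 3, 4, 5]
--     student2 = [2, 1, 2, 3, 2, 4, 2, 5]
--     student3 = [3, 3, 1, 1, 2, 2, 4, 4, 5, 5]
--
--     tmp = [0, 0, 0]
--
--     for i, a in enumerate(answers):
--         if student1[i % len(student1)] == a:
--             tmp[0] += 1
--         if student2[i % len(student2)] == a:
--             tmp[1] += 1
--         if student3[i % len(student3)] == a:
--             tmp[2] += 1
--
--     mx = max(tmp)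
--
--     for idx, i in enumerate(tmp):
--         if mx == i:
--             ans.append(idx + 1)
--     return ans
-- ===== SOURCE B (Python) =====
-- def solution(answers):
--     patterns = [
--         [1, 2, 3, 4, 5],
--         [2, 1, 2, 3, 2, 4, 2, 5],
--         [3, 3, 1, 1, 2, 2, 4, 4, 5, 5],
--     ]
--     P = 40  # common period (lcm of the three pattern lengths)
--     cycles = [[p[i % len(p)] for i in range(P)] for p in patterns]
--     freq = {}
--     for i, a in enumerate(answers):
--         key = (i % P, a)
--         freq[key] = freq.get(key, 0) + 1
--     scores = [sum(freq.get((r, c[r]), 0) for r in range(P)) for c in cycles]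
--     mx = max(scores)
--     return [s + 1 for s, sc in enumerate(scores) if sc == mx]
-- ===== Notes on version B (the rewrite author's own statement) =====
-- stated objective: alternative
-- what changed: B unrolls the three patterns to their common period 40, builds ONE frequency dictionary keyed by (index mod 40, answer) in a single pass, and then computes each student's score as a 40-term table-lookup sum over that index, instead of A's per-element loop that tests each answer against all three cyclic patterns with mutable counters.
import Mathlib
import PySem

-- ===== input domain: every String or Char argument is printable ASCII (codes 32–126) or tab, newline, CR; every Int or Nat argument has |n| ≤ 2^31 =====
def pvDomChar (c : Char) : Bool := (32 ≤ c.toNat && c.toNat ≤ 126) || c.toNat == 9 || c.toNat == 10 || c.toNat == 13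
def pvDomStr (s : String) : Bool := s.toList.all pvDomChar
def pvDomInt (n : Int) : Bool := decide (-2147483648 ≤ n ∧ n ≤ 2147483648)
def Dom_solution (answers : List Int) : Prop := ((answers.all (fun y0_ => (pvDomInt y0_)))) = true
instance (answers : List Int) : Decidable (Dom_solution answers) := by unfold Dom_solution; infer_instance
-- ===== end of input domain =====

-- B replaces A's per-element triple-test loop by a frequency dictionary keyed by
-- (index mod 40, answer) built in one pass; each score is then a 40-term lookup sum
-- over unrolled period-40 patterns (alternative algorithm; same values on all inputs).

-- ===== PORT A =====
def solution (answers : List Int) : List Int :=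
  let student1 : List Int := [1, 2, 3, 4, 5]
  let student2 : List Int := [2, 1, 2, 3, 2, 4, 2, 5]
  let student3 : List Int := [3, 3, 1, 1, 2, 2, 4, 4, 5, 5]
  let tmp : Int × Int × Int :=
    (PySem.List.enumerate answers).foldl
      (fun t ia =>
        let t := if PySem.List.pyGet? student1 (PySem.Int.mod ia.1 5) == some ia.2
                 then (t.1 + 1, t.2.1, t.2.2) else t
        let t := if PySem.List.pyGet? student2 (PySem.Int.mod ia.1 8) == some ia.2
                 then (t.1, t.2.1 + 1, t.2.2) else t
        if PySem.List.pyGet? student3 (PySem.Int.mod ia.1 10) == some ia.2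
        then (t.1, t.2.1, t.2.2 + 1) else t)
      (0, 0, 0)
  let mx := max tmp.1 (max tmp.2.1 tmp.2.2)
  (PySem.List.enumerate [tmp.1, tmp.2.1, tmp.2.2]).foldl
    (fun ans p => if mx == p.2 then ans ++ [p.1 + 1] else ans) []

-- ===== PORT B =====
def solution_alt (answers : List Int) : List Int :=
  let patterns : List (List Int) :=
    [[1, 2, 3, 4, 5], [2, 1, 2, 3, 2, 4, 2, 5], [3, 3, 1, 1, 2, 2, 4, 4, 5, 5]]
  let cycles : List (List Int) := patterns.map (fun p =>
    (PySem.List.pyRange 0 40 1).map (fun i => PySem.List.pyGetD p (PySem.Int.mod i (p.length : Int)) 0))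
  let freq : PySem.Dict (Int × Int) Int :=
    (PySem.List.enumerate answers).foldl
      (fun d ia =>
        let key := (PySem.Int.mod ia.1 40, ia.2)
        d.insert key (d.getD key 0 + 1))
      PySem.Dict.empty
  let scores : List Int := cycles.map (fun c =>
    (PySem.List.pyRange 0 40 1).foldl
      (fun s r => s + freq.getD (r, PySem.List.pyGetD c r 0) 0) 0)
  match PySem.List.max? scores (fun y => y) with
  | none => []
  | some mx =>
      (PySem.List.enumerate scores).filterMap
        (fun q => if q.2 == mx then some (q.1 + 1) else none)

-- ===== PRECONDITION & SPEC =====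
def Spec_solution (answers : List Int) (out : List Int) : Prop := out = solution_alt answers
instance (answers : List Int) (out : List Int) : Decidable (Spec_solution answers out) := by unfold Spec_solution; infer_instance

-- ===== CLAIM (what is proved, stated in full; the proofs are below) =====
def Claim_equal_solution : Prop := ∀ (answers : List Int), Dom_solution answers → Spec_solution answers (solution answers)

-- ===== LEMMAS AND PROOFS =====

-- A's fused loop computes the three match counts.
theorem counts_lemma (l : List (Int × Int)) (x y z : Int) :
    l.foldl
      (fun t ia =>
        let t := if PySem.List.pyGet? [1, 2, 3, 4, 5] (PySem.Int.mod ia.1 5) == some ia.2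
                 then (t.1 + 1, t.2.1, t.2.2) else t
        let t := if PySem.List.pyGet? [2, 1, 2, 3, 2, 4, 2, 5] (PySem.Int.mod ia.1 8) == some ia.2
                 then (t.1, t.2.1 + 1, t.2.2) else t
        if PySem.List.pyGet? [3, 3, 1, 1, 2, 2, 4, 4, 5, 5] (PySem.Int.mod ia.1 10) == some ia.2
        then (t.1, t.2.1, t.2.2 + 1) else t)
      (x, y, z)
    = (x + (l.countP (fun ia => PySem.List.pyGet? [1, 2, 3, 4, 5] (PySem.Int.mod ia.1 5) == some ia.2) : Int),
       y + (l.countP (fun ia => PySem.List.pyGet? [2, 1, 2, 3, 2, 4, 2, 5] (PySem.Int.mod ia.1 8) == some ia.2) : Int),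
       z + (l.countP (fun ia => PySem.List.pyGet? [3, 3, 1, 1, 2, 2, 4, 4, 5, 5] (PySem.Int.mod ia.1 10) == some ia.2) : Int)) := by
  induction l generalizing x y z with
  | nil => simp
  | cons h t ih =>
      simp only [List.foldl_cons, List.countP_cons]
      cases h1 : (PySem.List.pyGet? [1, 2, 3, 4, 5] (PySem.Int.mod h.1 5) == some h.2) <;>
      cases h2 : (PySem.List.pyGet? [2, 1, 2, 3, 2, 4, 2, 5] (PySem.Int.mod h.1 8) == some h.2) <;>
      cases h3 : (PySem.List.pyGet? [3, 3, 1, 1, 2, 2, 4, 4, 5, 5] (PySem.Int.mod h.1 10) == some h.2) <;>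
      simp only [if_true, if_false, Bool.false_eq_true, ih] <;>
      simp [Prod.ext_iff] <;> omega

-- indicator sum over the range collapses at the (in-range) residue m
theorem indicator_sum (g : Int → Int) (m a : Int) (hm0 : 0 ≤ m) (hm : m < 40) :
    ((PySem.List.pyRange 0 40 1).map
        (fun r => if ((m, a) == (r, g r)) then (1 : Int) else 0)).sum
    = if a == g m then 1 else 0 := by
  rw [PySem.List.sum_map_ite_one_zero]
  by_cases hag : a = g m
  · have h1 : List.countP (fun r => (m, a) == (r, g r)) (PySem.List.pyRange 0 40 1)
        = List.count m (PySem.List.pyRange 0 40 1) := by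
      rw [List.count_eq_countP]
      apply List.countP_congr
      intro r _
      by_cases hrm : r = m
      · subst hrm; simp [hag]
      · simp only [beq_iff_eq, Prod.mk.injEq]
        constructor
        · rintro ⟨h, -⟩; exact (hrm h.symm).elim
        · intro h; exact (hrm h).elim
    rw [h1, List.count_eq_one_of_mem (PySem.List.nodup_pyRange_one 0 40)
          (PySem.List.mem_pyRange_one.mpr ⟨hm0, hm⟩)]
    simp [hag]
  · have h0 : List.countP (fun r => (m, a) == (r, g r)) (PySem.List.pyRange 0 40 1) = 0 := by
      rw [List.countP_eq_zero]
      intro r _ hpred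
      rcases Prod.mk.injEq .. ▸ beq_iff_eq.mp hpred with ⟨hr, hga⟩
      exact hag (hr ▸ hga)
    simp [h0, hag]

-- sum over residues of per-class counts = total match count
theorem sum_countP_swap (g : Int → Int) (tgt : Int × Int → Bool)
    (h : ∀ ia : Int × Int, tgt ia = (ia.2 == g (PySem.Int.mod ia.1 40)))
    (l : List (Int × Int)) :
    ((PySem.List.pyRange 0 40 1).map
        (fun r => (l.countP (fun ia => (PySem.Int.mod ia.1 40, ia.2) == (r, g r)) : Int))).sum
    = (l.countP tgt : Int) := by
  induction l with
  | nil => simp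
  | cons ia t ih =>
      simp only [List.countP_cons, Nat.cast_add, Nat.cast_ite, Nat.cast_one, Nat.cast_zero]
      rw [PySem.List.sum_map_add_int, ih,
        indicator_sum g (PySem.Int.mod ia.1 40) ia.2
          (PySem.Int.mod_nonneg ia.1 (by norm_num)) (PySem.Int.mod_lt ia.1 (by norm_num)),
        h ia]

-- B's per-pattern score (table-lookup sum over the frequency dict) equals A's match count
theorem score_eq (p : List Int) (LI : Int) (hL : 0 < LI) (hlen : (p.length : Int) = LI)
    (hdvd : LI ∣ 40) (l : List (Int × Int)) :
    (PySem.List.pyRange 0 40 1).foldl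
      (fun s r => s +
        ((l.foldl
            (fun d ia =>
              let key := (PySem.Int.mod ia.1 40, ia.2)
              d.insert key (d.getD key 0 + 1))
            PySem.Dict.empty).getD
          (r, PySem.List.pyGetD
                ((PySem.List.pyRange 0 40 1).map
                  (fun i => PySem.List.pyGetD p (PySem.Int.mod i LI) 0)) r 0) 0)) 0
    = (l.countP (fun ia => PySem.List.pyGet? p (PySem.Int.mod ia.1 LI) == some ia.2) : Int) := by
  have hfreq : ∀ k : Int × Int,
      (l.foldl
          (fun d ia =>
            let key := (PySem.Int.mod ia.1 40, ia.2)
            d.insert key (d.getD key 0 + 1))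
          PySem.Dict.empty).getD k 0
      = (l.countP (fun ia => (PySem.Int.mod ia.1 40, ia.2) == k) : Int) := by
    intro k
    have h1 := PySem.Dict.getD_foldl_insert_add_one
      (l.map (fun ia => (PySem.Int.mod ia.1 40, ia.2))) PySem.Dict.empty k
    rw [List.foldl_map] at h1
    rw [List.count_eq_countP, List.countP_map, PySem.Dict.getD_empty] at h1
    simpa [Function.comp] using h1
  rw [PySem.List.foldl_add]
  simp only [hfreq]
  rw [zero_add]
  apply sum_countP_swap
  intro ia
  have h40 : (0 : Int) < 40 := by norm_num
  have hm0 := PySem.Int.mod_nonneg ia.1 h40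
  have hm40 := PySem.Int.mod_lt ia.1 h40
  rw [PySem.List.pyGetD_map_pyRange_of_nonneg _ 40 _ _ hm0 hm40]
  have hmm : PySem.Int.mod (PySem.Int.mod ia.1 40) LI = PySem.Int.mod ia.1 LI := by
    rw [PySem.Int.mod_eq_emod_of_pos hL, PySem.Int.mod_eq_emod_of_pos hL,
      PySem.Int.mod_eq_emod_of_pos h40]
    exact Int.emod_emod_of_dvd ia.1 hdvd
  rw [hmm]
  have hm'0 := PySem.Int.mod_nonneg ia.1 hL
  have hm' : PySem.Int.mod ia.1 LI < (p.length : Int) := by rw [hlen]; exact PySem.Int.mod_lt ia.1 hL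
  rw [PySem.List.pyGet?_eq_some_getElem p hm'0 hm', PySem.List.pyGetD_eq_getElem p 0 hm'0 hm']
  by_cases hav : ia.2 = p[(PySem.Int.mod ia.1 LI).toNat]
  · simp [hav]
  · rw [Bool.eq_iff_iff]
    simp only [beq_iff_eq, Option.some.injEq]
    exact ⟨fun h => (hav h.symm).elim, fun h => (hav h).elim⟩

-- selection tails agree
theorem tail_eq (a b c : Int) :
    (PySem.List.enumerate [a, b, c]).foldl
      (fun ans p => if max a (max b c) == p.2 then ans ++ [p.1 + 1] else ans) []
    = match PySem.List.max? [a, b, c] (fun y => y) with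
      | none => ([] : List Int)
      | some mx =>
          (PySem.List.enumerate [a, b, c]).filterMap
            (fun p => if p.2 == mx then some (p.1 + 1) else none) := by
  simp only [PySem.List.max?_id_cons, List.foldl_cons, List.foldl_nil,
    PySem.List.enumerate_cons, PySem.List.enumerate_nil,
    List.filterMap_cons, List.filterMap_nil, beq_iff_eq, max_assoc]
  split_ifs <;> first | (exfalso; omega) | norm_num

-- ===== VERDICT (by name: the statement is the Claim_ definition above) =====
theorem solution_spec : Claim_equal_solution := by
  intro answers _
  unfold Spec_solution solution solution_alt
  simp only [counts_lemma, zero_add, List.map_cons, List.map_nil, List.length_cons,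
    List.length_nil, Nat.reduceAdd, Nat.cast_ofNat]
  rw [score_eq [1,2,3,4,5] 5 (by norm_num) (by norm_num) (by norm_num),
      score_eq [2,1,2,3,2,4,2,5] 8 (by norm_num) (by norm_num) (by norm_num),
      score_eq [3,3,1,1,2,2,4,4,5,5] 10 (by norm_num) (by norm_num) (by norm_num)]
  exact tail_eq _ _ _
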